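-- pv_equiv track=rewrite | github.com/agil98/Leetcode | Python/Competitive_Gaming.py | numPlayersEasy
-- ===== SOURCE A (Python) =====
-- def numPlayersEasy(k, scores):
--     scores.sort(reverse = True)
--     ranking = []
--     tiedScore = 1
--     score = 1
--     i = 0
--     while i < (len(scores)):
--         if i == (len(scores) - 1):
--             if scores[i] != 0:
--                 for j in range(tiedScore):
--                     ranking.append(score)
--                 score += tiedScore
--                 tiedScore = 1
--         elif scores[i] != 0:
--             if scores[i] == scores[i+1]:
--                 tiedScore += 1
--             else:
--                 for j in range(tiedScore):
--                     ranking.append(score)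
--                 score += tiedScore
--                 tiedScore = 1
--         i+=1
--     if k in ranking:
--         ranking.reverse()
--         index = ranking.index(k)
--         return len(ranking) - index
--     elif not ranking:
--         return 0
--     else:
--         return len(ranking)
-- ===== SOURCE B (Python) =====
-- def numPlayersEasy(k, scores):
--     scores.sort(reverse=True)
--     nonzero = [s for s in scores if s != 0]
--     n = len(nonzero)
--     rank = 1
--     for i in range(n):
--         if i + 1 < n and nonzero[i + 1] == nonzero[i]:
--             continue  # still inside the current tie group
--         if rank == k:
--             return i + 1  # players with rank <= k
--         rank = i + 2  # next group's rank
--     return n  # k is no group's rank: total ranked players (0 if none)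
-- ===== Notes on version B (the rewrite author's own statement) =====
-- stated objective: simpler
-- what changed: B replaces A's build-a-ranking-list-then-reverse-and-index search with a single pass over the sorted nonzero scores that tracks only a counter and the current group's rank, returning early at the group whose rank equals k.
import Mathlib
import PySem

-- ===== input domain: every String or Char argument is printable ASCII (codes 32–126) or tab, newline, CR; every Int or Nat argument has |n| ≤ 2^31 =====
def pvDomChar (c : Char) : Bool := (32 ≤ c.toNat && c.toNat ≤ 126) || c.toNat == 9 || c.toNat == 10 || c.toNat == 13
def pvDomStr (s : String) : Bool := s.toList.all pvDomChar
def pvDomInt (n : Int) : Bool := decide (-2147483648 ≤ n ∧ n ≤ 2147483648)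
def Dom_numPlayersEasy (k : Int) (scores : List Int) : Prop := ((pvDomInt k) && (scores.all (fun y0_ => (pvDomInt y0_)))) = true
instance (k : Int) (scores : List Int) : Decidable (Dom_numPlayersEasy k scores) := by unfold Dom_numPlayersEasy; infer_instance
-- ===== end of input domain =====

-- B replaces A's ranking-list construction + reverse/index search by a single early-returning
-- pass over the sorted nonzero scores tracking a counter and the current group's rank (simpler).
-- A sorts `scores` in place (B performs the same mutation); the equivalence proved is about the return value.

-- ===== PORT A =====
-- `for j in range(tiedScore): ranking.append(score)`
def pvFlush (ranking : List Int) (tied score : Int) : List Int :=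
  (PySem.List.pyRange 0 tied 1).foldl (fun r _ => r ++ [score]) ranking

-- the while loop over i: each iteration reads scores[i] and (when not last) scores[i+1],
-- so it is transcribed as structural recursion on the suffix starting at i, same state.
def pvALoop : List Int → List Int → Int → Int → List Int
  | [], ranking, _, _ => ranking
  | [x], ranking, tied, score =>
      if x ≠ 0 then pvFlush ranking tied score else ranking
  | x :: y :: rest, ranking, tied, score =>
      if x ≠ 0 then
        if x = y then pvALoop (y :: rest) ranking (tied + 1) score
        else pvALoop (y :: rest) (pvFlush ranking tied score) 1 (score + tied)
      else pvALoop (y :: rest) ranking tied score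

def numPlayersEasy (k : Int) (scores : List Int) : Int :=
  let xs := PySem.List.sorted scores (fun x => x) true
  let ranking := pvALoop xs [] 1 1
  if k ∈ ranking then
    let rev := ranking.reverse
    match PySem.List.index? rev k with
    | some i => (rev.length : Int) - (i : Int)
    | none => 0   -- unreachable: guarded by k ∈ ranking
  else if ranking = [] then 0
  else (ranking.length : Int)

-- ===== PORT B =====
-- the for loop with early return: c = i (players consumed), rank = current group's rank
def pvBLoop (k : Int) : List Int → Int → Int → Int
  | [], c, _ => c
  | x :: rest, c, rank =>
      if rest.head? = some x then pvBLoop k rest (c + 1) rank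
      else if rank = k then c + 1
      else pvBLoop k rest (c + 1) (c + 2)

def numPlayersEasy_alt (k : Int) (scores : List Int) : Int :=
  let xs := PySem.List.sorted scores (fun x => x) true
  pvBLoop k (xs.filter (fun s => s ≠ 0)) 0 1

-- ===== PRECONDITION & SPEC =====
def Spec_numPlayersEasy (k : Int) (scores : List Int) (out : Int) : Prop := out = numPlayersEasy_alt k scores
instance (k : Int) (scores : List Int) (out : Int) : Decidable (Spec_numPlayersEasy k scores out) := by unfold Spec_numPlayersEasy; infer_instance

-- ===== CLAIM (what is proved, stated in full; the proofs are below) =====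
def Claim_equal_numPlayersEasy : Prop := ∀ (k : Int) (scores : List Int), Dom_numPlayersEasy k scores → Spec_numPlayersEasy k scores (numPlayersEasy k scores)

-- ===== LEMMAS AND PROOFS =====

-- A's post-loop computation, as a function of the finished ranking list
def pvPost (k : Int) (ranking : List Int) : Int :=
  if k ∈ ranking then
    match PySem.List.index? ranking.reverse k with
    | some i => (ranking.reverse.length : Int) - (i : Int)
    | none => 0
  else if ranking = [] then 0
  else (ranking.length : Int)

-- proof-side characterization of the ranking produced from a (filtered, nonzero) score list
def rkGen : List Int → Int → Int → List Int
  | [], _, _ => []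
  | x :: rest, tied, r =>
      if rest.head? = some x then rkGen rest (tied + 1) r
      else List.replicate tied.toNat r ++ rkGen rest 1 (r + tied)

lemma foldl_append_const {α β : Type} (s : β) :
    ∀ (l : List α) (acc : List β),
      l.foldl (fun r _ => r ++ [s]) acc = acc ++ List.replicate l.length s := by
  intro l
  induction l with
  | nil => intro acc; simp
  | cons a t ih =>
      intro acc
      simp [List.foldl, ih, List.replicate_succ]

lemma pvFlush_eq (ranking : List Int) (tied score : Int) :
    pvFlush ranking tied score = ranking ++ List.replicate tied.toNat score := by
  rw [pvFlush, foldl_append_const, PySem.List.length_pyRange_one]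
  simp

lemma rkGen_ge : ∀ (f : List Int) (tied r : Int), 1 ≤ tied →
    ∀ v ∈ rkGen f tied r, r ≤ v := by
  intro f
  induction f with
  | nil => intro tied r _ v hv; simp [rkGen] at hv
  | cons x rest ih =>
      intro tied r htied v hv
      rw [rkGen] at hv
      by_cases h : rest.head? = some x
      · simp only [h, if_true] at hv
        exact ih (tied + 1) r (by omega) v hv
      · rw [if_neg h] at hv
        rcases List.mem_append.mp hv with h1 | h2
        · rw [List.eq_of_mem_replicate h1]
        · have := ih 1 (r + tied) (by omega) v h2
          omega

-- the while loop produces exactly rkGen of the filtered list (sortedness rules out a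
-- zero sitting between two equal nonzero scores)
lemma pvALoop_eq_rkGen :
    ∀ (xs ranking : List Int) (tied score : Int),
      List.Pairwise (fun a b => b ≤ a) xs → 1 ≤ tied →
      (tied = 1 ∨ ∃ x ys, xs = x :: ys ∧ x ≠ 0) →
      pvALoop xs ranking tied score
        = ranking ++ rkGen (xs.filter (fun s => s ≠ 0)) tied score := by
  intro xs
  induction xs with
  | nil => intro ranking tied score _ _ _; simp [pvALoop, rkGen]
  | cons x t ih =>
      intro ranking tied score hp htied hinv
      match t with
      | [] =>
          by_cases hx : x = 0
          · simp [pvALoop, hx, rkGen]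
          · simp only [pvALoop, if_pos (by exact hx : x ≠ 0)]
            rw [pvFlush_eq]
            simp [hx, rkGen]
      | y :: rest =>
          have hpt : List.Pairwise (fun a b : Int => b ≤ a) (y :: rest) :=
            (List.pairwise_cons.mp hp).2
          by_cases hx : x = 0
          · -- zero head: skipped by both sides; tied must be 1
            have ht1 : tied = 1 := by
              rcases hinv with h | ⟨x', ys', hxy, hx'⟩
              · exact h
              · cases hxy; exact absurd hx hx'
            have : pvALoop (x :: y :: rest) ranking tied score
                = pvALoop (y :: rest) ranking tied score := by
              simp [pvALoop, hx]
            rw [this, ih ranking tied score hpt htied (Or.inl ht1)]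
            simp [hx]
          · by_cases hxy : x = y
            · -- same group continues
              have hy : y ≠ 0 := by rw [← hxy]; exact hx
              have : pvALoop (x :: y :: rest) ranking tied score
                  = pvALoop (y :: rest) ranking (tied + 1) score := by
                simp [pvALoop, hxy]
                intro h; exact absurd h hy
              rw [this, ih ranking (tied + 1) score hpt (by omega)
                    (Or.inr ⟨y, rest, rfl, hy⟩)]
              have hfil : (x :: y :: rest).filter (fun s => s ≠ 0)
                  = x :: (y :: rest).filter (fun s => s ≠ 0) := by
                simp [List.filter_cons, hx]
              rw [hfil, rkGen]
              have hhead : ((y :: rest).filter (fun s => s ≠ 0)).head? = some x := by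
                simp [hy, hxy]
              rw [if_pos hhead]
            · -- boundary: flush
              have : pvALoop (x :: y :: rest) ranking tied score
                  = pvALoop (y :: rest) (pvFlush ranking tied score) 1 (score + tied) := by
                simp [pvALoop, hx, hxy]
              rw [this, ih (pvFlush ranking tied score) 1 (score + tied) hpt (by omega) (Or.inl rfl)]
              have hfil : (x :: y :: rest).filter (fun s => s ≠ 0)
                  = x :: (y :: rest).filter (fun s => s ≠ 0) := by
                simp [List.filter_cons, hx]
              have hhead : ¬ ((y :: rest).filter (fun s => s ≠ 0)).head? = some x := by
                by_cases hy : y = 0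
                · -- x > 0 > every nonzero later element
                  have hxpos : 0 < x := by
                    have : y ≤ x := (List.pairwise_cons.mp hp).1 y (by simp)
                    omega
                  intro hcontra
                  have hmem : x ∈ (y :: rest).filter (fun s => s ≠ 0) :=
                    List.mem_of_mem_head? hcontra
                  have hx' := List.of_mem_filter hmem
                  have hx'' := List.mem_of_mem_filter hmem
                  simp at hx'
                  rcases List.mem_cons.mp hx'' with h | h
                  · exact hx (h.trans hy)
                  · have : x ≤ y := (List.pairwise_cons.mp hpt).1 x h
                    omega
                · simp [hy]
                  intro h; exact absurd h.symm hxy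
              rw [hfil, rkGen, if_neg hhead, pvFlush_eq, List.append_assoc]

lemma pv_replicate_append_cons {α : Type} (n : Nat) (a : α) (l : List α) :
    List.replicate n a ++ a :: l = a :: (List.replicate n a ++ l) := by
  induction n with
  | zero => simp
  | succ m ih => simp only [List.replicate_succ, List.cons_append, ih]

-- A's post-processing of the (prefix ++ remaining) ranking equals B's early-return loop
lemma pvPost_eq_pvBLoop :
    ∀ (f : List Int) (tied r : Int) (P : List Int) (k : Int),
      1 ≤ tied → (f = [] → tied = 1) →
      (∀ v ∈ P, v < r) → k ∉ P → r = (P.length : Int) + 1 →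
      pvPost k (P ++ rkGen f tied r)
        = pvBLoop k f ((P.length : Int) + (tied - 1)) r := by
  intro f
  induction f with
  | nil =>
      intro tied r P k htied hnil hlt hk hr
      have ht1 : tied = 1 := hnil rfl
      subst ht1
      rw [rkGen, List.append_nil, pvBLoop]
      rw [pvPost, if_neg hk]
      cases P with
      | nil => simp
      | cons p q => simp
  | cons x rest ih =>
      intro tied r P k htied hnil hlt hk hr
      by_cases hmatch : rest.head? = some x
      · -- inside a tie group
        have hrest : rest ≠ [] := by
          intro h; rw [h] at hmatch; simp at hmatch
        rw [rkGen, if_pos hmatch, pvBLoop, if_pos hmatch]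
        have := ih (tied + 1) r P k (by omega) (fun h => absurd h hrest) hlt hk hr
        rw [this]
        ring_nf
      · -- group boundary
        rw [rkGen, if_neg hmatch, pvBLoop, if_neg hmatch]
        by_cases hkr : r = k
        · rw [if_pos hkr]
          subst hkr
          -- k = r occurs exactly at positions |P| .. |P|+tied-1 of the full ranking
          set S := rkGen rest 1 (r + tied) with hS
          have hkS : r ∉ S := by
            intro hmem
            have := rkGen_ge rest 1 (r + tied) (by omega) r hmem
            omega
          have hrepl : List.replicate tied.toNat r = r :: List.replicate (tied.toNat - 1) r := by
            have : tied.toNat = (tied.toNat - 1) + 1 := by omega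
            rw [this, List.replicate_succ]
            simp
          have hmemR : r ∈ P ++ (List.replicate tied.toNat r ++ S) := by
            rw [hrepl]; simp
          rw [pvPost, if_pos hmemR]
          have hrev : (P ++ (List.replicate tied.toNat r ++ S)).reverse
              = S.reverse ++ r :: (List.replicate (tied.toNat - 1) r ++ P.reverse) := by
            rw [hrepl]
            simp only [List.reverse_append, List.reverse_cons, List.append_assoc,
              List.reverse_replicate, List.singleton_append]
            rw [pv_replicate_append_cons]
          have hidx : PySem.List.index?
              ((P ++ (List.replicate tied.toNat r ++ S)).reverse) r = some S.reverse.length := by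
            rw [PySem.List.index?_eq_some_iff]
            exact ⟨S.reverse, List.replicate (tied.toNat - 1) r ++ P.reverse, hrev, rfl,
              by simpa using hkS⟩
          rw [hidx]
          simp only [List.length_reverse, List.length_append, List.length_replicate]
          push_cast
          omega
        · rw [if_neg hkr]
          have hassoc : P ++ (List.replicate tied.toNat r ++ rkGen rest 1 (r + tied))
              = (P ++ List.replicate tied.toNat r) ++ rkGen rest 1 (r + tied) := by
            rw [List.append_assoc]
          rw [hassoc]
          have hlt' : ∀ v ∈ P ++ List.replicate tied.toNat r, v < r + tied := by
            intro v hv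
            rcases List.mem_append.mp hv with h | h
            · have := hlt v h; omega
            · rw [List.eq_of_mem_replicate h]; omega
          have hk' : k ∉ P ++ List.replicate tied.toNat r := by
            intro hv
            rcases List.mem_append.mp hv with h | h
            · exact hk h
            · exact hkr (List.eq_of_mem_replicate h).symm
          have hr' : r + tied = ((P ++ List.replicate tied.toNat r).length : Int) + 1 := by
            simp only [List.length_append, List.length_replicate]
            push_cast
            omega
          have := ih 1 (r + tied) (P ++ List.replicate tied.toNat r) k (by omega)
            (fun _ => rfl) hlt' hk' hr'
          rw [this]
          congr 1 <;> [skip; omega]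
          simp only [List.length_append, List.length_replicate]
          push_cast
          omega

-- ===== VERDICT (by name: the statement is the Claim_ definition above) =====
theorem numPlayersEasy_spec : Claim_equal_numPlayersEasy := by
  intro k scores _
  show numPlayersEasy k scores = numPlayersEasy_alt k scores
  have hp : List.Pairwise (fun a b : Int => b ≤ a)
      (PySem.List.sorted scores (fun x => x) true) := by
    simpa using PySem.List.sorted_pairwise_rev scores (fun x => x)
  have h1 : numPlayersEasy k scores
      = pvPost k (pvALoop (PySem.List.sorted scores (fun x => x) true) [] 1 1) := rfl
  have h2 : numPlayersEasy_alt k scores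
      = pvBLoop k ((PySem.List.sorted scores (fun x => x) true).filter (fun s => s ≠ 0)) 0 1 := rfl
  rw [h1, h2, pvALoop_eq_rkGen _ [] 1 1 hp (by omega) (Or.inl rfl), List.nil_append]
  have hpost := pvPost_eq_pvBLoop
    ((PySem.List.sorted scores (fun x => x) true).filter (fun s => s ≠ 0))
    1 1 [] k (by omega) (fun _ => rfl) (by simp) (by simp) (by simp)
  simpa using hpost
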